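-- pv_equiv track=rewrite | github.com/mike-taylor99/AoC2022 | Day 9/day9.py | closestDistance
-- ===== SOURCE A (Python) =====
-- SAME_ROW = [(0, y) for y in range(-1, 2)]
--
-- SAME_COLUMN = [(x, 0) for x in range(-1, 2)]
--
-- DIAGONALS = [(x, y) for x in range(-1, 2, 2) for y in range(-1, 2, 2)]
--
-- ALLOWED_DISTANCES = set(SAME_ROW + SAME_COLUMN + DIAGONALS)
--
-- def isTailCloseEnough(head, tail):
--     distance = (head[0] - tail[0], head[1] - tail[1])
--     return distance in ALLOWED_DISTANCES
--
-- def closestDistance(head, tail):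
--     row_dist, col_dist = head[0] - tail[0], head[1] - tail[1]
--
--     if isTailCloseEnough(head, tail):
--         return tail
--     elif row_dist == 0:
--         for x, y in SAME_ROW:
--             updatedTail = (tail[0] + x, tail[1] + y)
--             if isTailCloseEnough(head, updatedTail):
--                 return updatedTail
--     elif col_dist == 0:
--         for x, y in SAME_COLUMN:
--             updatedTail = (tail[0] + x, tail[1] + y)
--             if isTailCloseEnough(head, updatedTail):
--                 return updatedTail
--     else:
--         for x, y in DIAGONALS:
--             updatedTail = (tail[0] + x, tail[1] + y)
--             if isTailCloseEnough(head, updatedTail):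
--                 return updatedTail
-- ===== SOURCE B (Python) =====
-- SAME_ROW = [(0, y) for y in range(-1, 2)]
--
-- SAME_COLUMN = [(x, 0) for x in range(-1, 2)]
--
-- DIAGONALS = [(x, y) for x in range(-1, 2, 2) for y in range(-1, 2, 2)]
--
-- ALLOWED_DISTANCES = set(SAME_ROW + SAME_COLUMN + DIAGONALS)
--
-- def closestDistance(head, tail):
--     dx, dy = head[0] - tail[0], head[1] - tail[1]
--     if (dx, dy) in ALLOWED_DISTANCES:
--         return tail
--     cand = (tail[0] + (dx > 0) - (dx < 0), tail[1] + (dy > 0) - (dy < 0))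
--     if (head[0] - cand[0], head[1] - cand[1]) in ALLOWED_DISTANCES:
--         return cand
--     return None
-- ===== Notes on version B (the rewrite author's own statement) =====
-- stated objective: simpler
-- what changed: B replaces A's three candidate-scanning loops (over SAME_ROW / SAME_COLUMN / DIAGONALS) with a direct closed-form sign step: move tail one step toward head by (sgn(dx), sgn(dy)) and keep it only if the result is within the allowed-distance set, else None.
import Mathlib
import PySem

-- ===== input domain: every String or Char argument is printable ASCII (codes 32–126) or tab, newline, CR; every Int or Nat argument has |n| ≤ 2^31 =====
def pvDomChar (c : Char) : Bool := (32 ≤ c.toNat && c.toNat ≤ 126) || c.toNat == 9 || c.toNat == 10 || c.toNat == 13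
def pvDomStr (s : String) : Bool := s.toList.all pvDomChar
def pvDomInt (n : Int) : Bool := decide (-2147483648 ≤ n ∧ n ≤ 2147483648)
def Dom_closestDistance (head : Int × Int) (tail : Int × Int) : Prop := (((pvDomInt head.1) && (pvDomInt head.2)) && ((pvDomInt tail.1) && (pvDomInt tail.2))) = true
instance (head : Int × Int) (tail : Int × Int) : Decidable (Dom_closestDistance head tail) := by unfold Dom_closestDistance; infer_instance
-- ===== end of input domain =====

-- B replaces A's three candidate-scanning loops with a direct sign-step computation
-- (candidate = tail moved one step toward head, kept only if then close enough): simpler.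


-- ===== PORT A =====
def pvSameRow : List (Int × Int) := [(0, -1), (0, 0), (0, 1)]
def pvSameColumn : List (Int × Int) := [(-1, 0), (0, 0), (1, 0)]
def pvDiagonals : List (Int × Int) := [(-1, -1), (-1, 1), (1, -1), (1, 1)]
def pvAllowedDistances : PySem.Set (Int × Int) :=
  PySem.Set.ofList (pvSameRow ++ pvSameColumn ++ pvDiagonals)

def isTailCloseEnough (head : Int × Int) (tail : Int × Int) : Bool :=
  PySem.Set.contains pvAllowedDistances (head.1 - tail.1, head.2 - tail.2)

-- the 'for … in moves: if isTailCloseEnough: return' loop (first hit, else fall through to None)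
def pvScan (head : Int × Int) (tail : Int × Int) : List (Int × Int) → Option (Int × Int)
  | [] => none
  | (x, y) :: rest =>
    let updatedTail := (tail.1 + x, tail.2 + y)
    if isTailCloseEnough head updatedTail then some updatedTail
    else pvScan head tail rest

def closestDistance (head : Int × Int) (tail : Int × Int) : Option (Int × Int) :=
  let row_dist := head.1 - tail.1
  let col_dist := head.2 - tail.2
  if isTailCloseEnough head tail then some tail
  else if row_dist = 0 then pvScan head tail pvSameRow
  else if col_dist = 0 then pvScan head tail pvSameColumn
  else pvScan head tail pvDiagonals

-- ===== PORT B =====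
def closestDistance_alt (head : Int × Int) (tail : Int × Int) : Option (Int × Int) :=
  let dx := head.1 - tail.1
  let dy := head.2 - tail.2
  if PySem.Set.contains pvAllowedDistances (dx, dy) then some tail
  else
    let cand := (tail.1 + ((if dx > 0 then (1:Int) else 0) - (if dx < 0 then 1 else 0)),
                 tail.2 + ((if dy > 0 then (1:Int) else 0) - (if dy < 0 then 1 else 0)))
    if PySem.Set.contains pvAllowedDistances (head.1 - cand.1, head.2 - cand.2) then some cand
    else none

-- ===== PRECONDITION & SPEC =====
def Spec_closestDistance (head : Int × Int) (tail : Int × Int) (out : Option (Int × Int)) : Prop := out = closestDistance_alt head tail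
instance (head : Int × Int) (tail : Int × Int) (out : Option (Int × Int)) : Decidable (Spec_closestDistance head tail out) := by unfold Spec_closestDistance; infer_instance

-- ===== CLAIM (what is proved, stated in full; the proofs are below) =====
def Claim_equal_closestDistance : Prop := ∀ (head : Int × Int) (tail : Int × Int), Dom_closestDistance head tail → Spec_closestDistance head tail (closestDistance head tail)

-- ===== LEMMAS AND PROOFS =====

-- membership in the allowed-distance set is Chebyshev distance ≤ 1
theorem allowed_eq : pvAllowedDistances =
    [(0, -1), (0, 0), (0, 1), (-1, 0), (1, 0), (-1, -1), (-1, 1), (1, -1), (1, 1)] := by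
  decide

theorem mem_allowed (a b : Int) :
    PySem.Set.contains pvAllowedDistances (a, b)
      = decide (-1 ≤ a ∧ a ≤ 1 ∧ -1 ≤ b ∧ b ≤ 1) := by
  have h : PySem.Set.contains pvAllowedDistances (a, b) = true
      ↔ (-1 ≤ a ∧ a ≤ 1 ∧ -1 ≤ b ∧ b ≤ 1) := by
    rw [allowed_eq, PySem.Set.contains_iff]
    simp [Prod.ext_iff]
    omega
  rcases Bool.eq_false_or_eq_true (PySem.Set.contains pvAllowedDistances (a, b)) with h2 | h2 <;>
    simp [h2] at h ⊢ <;> simp [h]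

-- ===== VERDICT (by name: the statement is the Claim_ definition above) =====
set_option maxHeartbeats 1000000 in
theorem closestDistance_spec : Claim_equal_closestDistance := by
  intro ⟨hx, hy⟩ ⟨tx, ty⟩ _
  unfold Spec_closestDistance closestDistance closestDistance_alt
  simp only [pvSameRow, pvSameColumn, pvDiagonals, pvScan]
  simp only [isTailCloseEnough, mem_allowed]
  split_ifs <;>
    (try simp only [decide_eq_true_eq] at *) <;>
    first
      | rfl
      | (exfalso; omega)
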